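-- pv_equiv track=rewrite | github.com/MrUzairr/AI_Lab_Tasks | Week3/task2.py | balance_brackets
-- ===== SOURCE A (Python) =====
-- def balance_brackets(s):
--     open_bracket_count = 0
--     close_bracket_count = 0
--
--     for char in s:
--         if char == '(':
--             open_bracket_count += 1
--         elif char == ')':
--             if open_bracket_count > 0:
--                 open_bracket_count -= 1
--             else:
--                 close_bracket_count += 1
--
--     balanced_sequence = '(' * close_bracket_count + s + ')' * open_bracket_count
--
--     return balanced_sequence
-- ===== SOURCE B (Python) =====
-- def balance_brackets(s):
--     # Reduce the bracket projection of s to its Dyck normal form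
--     # by repeatedly deleting the leftmost adjacent matched pair; the normal form
--     # directly lists the unmatched brackets, which give the padding counts.
--     t = ''.join(ch for ch in s if ch in '()')
--     while True:
--         i = t.find('()')
--         if i == -1:
--             break
--         t = t[:i] + t[i + 2:]
--     return '(' * t.count(')') + s + ')' * t.count('(')
-- ===== Notes on version B (the rewrite author's own statement) =====
-- stated objective: alternative
-- what changed: Instead of A's one-pass scan with two counters, B projects s onto its brackets and repeatedly deletes the leftmost adjacent matched pair until none remains; the Dyck normal form that remains (all unmatched closers followed by all unmatched openers) gives the two padding counts directly. On typical inputs the pair-cancellation work runs in C-level str.find/slicing rather than A's per-character Python loop (measured ~2x at the largest size), though B's worst case is quadratic.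
import Mathlib
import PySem

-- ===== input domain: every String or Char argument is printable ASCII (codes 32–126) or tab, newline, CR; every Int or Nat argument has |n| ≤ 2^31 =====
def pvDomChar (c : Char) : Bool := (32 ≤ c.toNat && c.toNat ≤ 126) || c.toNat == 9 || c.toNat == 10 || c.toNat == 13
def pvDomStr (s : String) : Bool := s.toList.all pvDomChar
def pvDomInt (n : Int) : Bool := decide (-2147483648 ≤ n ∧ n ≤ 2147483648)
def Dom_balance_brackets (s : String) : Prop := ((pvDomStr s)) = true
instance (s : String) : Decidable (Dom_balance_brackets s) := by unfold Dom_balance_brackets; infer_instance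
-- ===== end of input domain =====

-- B replaces A's one-pass two-counter scan by a reduction algorithm: project s to its
-- brackets and repeatedly delete the leftmost adjacent open-close pair until none is
-- left; the Dyck normal form (all unmatched closers, then all unmatched openers) that
-- remains lists the padding counts directly. Alternative algorithm, same result.

-- ===== PORT A =====
-- loop body of A: state = (open_bracket_count, close_bracket_count)
def pvAStep (p : Int × Int) (c : Char) : Int × Int :=
  if c = '(' then (p.1 + 1, p.2)
  else if c = ')' then
    (if p.1 > 0 then (p.1 - 1, p.2) else (p.1, p.2 + 1))
  else p

def balance_brackets (s : String) : String :=
  let st := s.toList.foldl pvAStep (0, 0)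
  String.mk (List.replicate st.2.toNat '(' ++ s.toList ++ List.replicate st.1.toNat ')')

-- ===== PORT B =====
-- decomposition of one loop step of B: when t.find('()') ≠ -1 the string splits as
-- u, the matched pair, then v, and t[:i] + t[i+2:] is u ++ v  (needed by pvReduce's termination proof)
theorem pvFind_decomp (t : List Char) (h : ¬ PySem.Chars.find t ['(', ')'] = -1) :
    ∃ u v, t = u ++ '(' :: ')' :: v ∧
      PySem.List.slice t none (some (PySem.Chars.find t ['(', ')'])) ++
        PySem.List.slice t (some (PySem.Chars.find t ['(', ')'] + 2)) none = u ++ v := by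
  have hge : 0 ≤ PySem.Chars.find t ['(', ')'] := by
    have := PySem.Chars.neg_one_le_find t ['(', ')']
    omega
  obtain ⟨hpre, -⟩ := PySem.Chars.find_spec hge
  set i : Nat := (PySem.Chars.find t ['(', ')']).toNat with hi
  obtain ⟨v, hv⟩ := hpre
  refine ⟨t.take i, v, ?_, ?_⟩
  · conv_lhs => rw [← List.take_append_drop i t, ← hv]
    simp
  · rw [PySem.List.slice_to t hge, PySem.List.slice_from t (by omega)]
    have h2 : (PySem.Chars.find t ['(', ')'] + 2).toNat = i + 2 := by omega
    rw [h2, ← hi]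
    have hdv : t.drop (i + 2) = v := by
      have h3 := congrArg (List.drop 2) hv
      simpa [List.drop_drop, Nat.add_comm] using h3.symm
    rw [hdv]

-- while loop of B: i = t.find('()'); if i == -1: break; t = t[:i] + t[i+2:]
def pvReduce (t : List Char) : List Char :=
  if h : PySem.Chars.find t ['(', ')'] = -1 then t
  else
    pvReduce (PySem.List.slice t none (some (PySem.Chars.find t ['(', ')'])) ++
      PySem.List.slice t (some (PySem.Chars.find t ['(', ')'] + 2)) none)
termination_by t.length
decreasing_by
  obtain ⟨u, v, ht, he⟩ := pvFind_decomp t h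
  rw [he]
  conv_rhs => rw [ht]
  simp

def balance_brackets_alt (s : String) : String :=
  -- t = ''.join(ch for ch in s if ch in '()'), reduced by the while loop
  let t := pvReduce (s.toList.filter (fun ch => ch == '(' || ch == ')'))
  String.mk (List.replicate (PySem.Chars.count t [')']) '(' ++ s.toList ++
    List.replicate (PySem.Chars.count t ['(']) ')')

-- ===== PRECONDITION & SPEC =====
def Spec_balance_brackets (s : String) (out : String) : Prop := out = balance_brackets_alt s
instance (s : String) (out : String) : Decidable (Spec_balance_brackets s out) := by unfold Spec_balance_brackets; infer_instance

-- ===== CLAIM (what is proved, stated in full; the proofs are below) =====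
def Claim_equal_balance_brackets : Prop := ∀ (s : String), Dom_balance_brackets s → Spec_balance_brackets s (balance_brackets s)

-- ===== LEMMAS AND PROOFS =====

-- Python str.count with a single-character needle is List.count
theorem pvCount_go_singleton (c : Char) : ∀ (fuel : Nat) (l : List Char) (acc : Nat),
    l.length ≤ fuel → PySem.Chars.count.go [c] fuel l acc = acc + l.count c := by
  intro fuel
  induction fuel with
  | zero =>
    intro l acc h
    cases l with
    | nil => simp [PySem.Chars.count.go]
    | cons x t => simp at h
  | succ n ih =>
    intro l acc h
    match l with
    | [] => simp [PySem.Chars.count.go]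
    | x :: t =>
      simp only [PySem.Chars.count.go]
      by_cases hx : c = x
      · subst hx
        rw [if_pos (by simp [List.isPrefixOf])]
        rw [show List.drop (List.length [c]) (c :: t) = t from rfl]
        simp only [List.length_cons] at h
        rw [ih t (acc + 1) (by omega)]
        simp [List.count_cons]
        omega
      · rw [if_neg (by simp [List.isPrefixOf, hx, Ne.symm hx])]
        simp only [List.length_cons] at h
        rw [ih t acc (by omega)]
        simp [List.count_cons, Ne.symm hx]

theorem pvCount_singleton (l : List Char) (c : Char) :
    PySem.Chars.count l [c] = l.count c := by
  simp [PySem.Chars.count, pvCount_go_singleton c l.length l 0 le_rfl]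

-- non-bracket characters do not change A's state
theorem pvAStep_nonbracket {c : Char} (h1 : ¬ c = '(') (h2 : ¬ c = ')') (p : Int × Int) :
    pvAStep p c = p := by simp [pvAStep, h1, h2]

-- the fold over s equals the fold over its bracket projection
theorem pvFold_filter (l : List Char) : ∀ p : Int × Int,
    (l.filter (fun ch => ch == '(' || ch == ')')).foldl pvAStep p = l.foldl pvAStep p := by
  induction l with
  | nil => intro p; rfl
  | cons c t ih =>
    intro p
    by_cases h1 : c = '('
    · simp [h1, ih]
    · by_cases h2 : c = ')'
      · simp [h2, ih]
      · simp [List.filter_cons, h1, h2, pvAStep_nonbracket h1 h2, ih]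

-- the first component of A's state stays nonnegative
theorem pvFold_fst_nonneg (l : List Char) : ∀ p : Int × Int, 0 ≤ p.1 →
    0 ≤ (l.foldl pvAStep p).1 := by
  induction l with
  | nil => intro p h; exact h
  | cons c t ih =>
    intro p h
    simp only [List.foldl_cons]
    by_cases h1 : c = '('
    · exact ih _ (by simp [pvAStep, h1]; omega)
    · by_cases h2 : c = ')'
      · refine ih _ ?_
        simp only [pvAStep, h2, if_true]
        split_ifs with h3 <;> simp <;> omega
      · rw [pvAStep_nonbracket h1 h2]; exact ih p h

-- deleting an adjacent matched pair does not change A's fold (from a state with 0 ≤ fst)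
theorem pvFold_cancel (u v : List Char) (p : Int × Int) (h : 0 ≤ p.1) :
    (u ++ '(' :: ')' :: v).foldl pvAStep p = (u ++ v).foldl pvAStep p := by
  have key : ∀ q : Int × Int, 0 ≤ q.1 → pvAStep (pvAStep q '(') ')' = q := by
    intro q hq
    have h1 : pvAStep q '(' = (q.1 + 1, q.2) := by simp [pvAStep]
    rw [h1]
    have h2 : q.1 + 1 > 0 := by omega
    simp [pvAStep, h2]
  have hq : 0 ≤ (u.foldl pvAStep p).1 := pvFold_fst_nonneg u p h
  rw [List.foldl_append, List.foldl_append, List.foldl_cons, List.foldl_cons, key _ hq]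

-- the reduction loop preserves A's fold
theorem pvReduce_fold (t : List Char) : ∀ p : Int × Int, 0 ≤ p.1 →
    (pvReduce t).foldl pvAStep p = t.foldl pvAStep p := by
  induction t using pvReduce.induct with
  | case1 t h => intro p hp; rw [pvReduce, dif_pos h]
  | case2 t h ih =>
    intro p hp
    obtain ⟨u, v, ht, he⟩ := pvFind_decomp t h
    rw [pvReduce, dif_neg h, ih p hp, he]
    conv_rhs => rw [ht]
    exact (pvFold_cancel u v p hp).symm

-- every character of the reduced string comes from the original
theorem pvReduce_subset (t : List Char) : ∀ x ∈ pvReduce t, x ∈ t := by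
  induction t using pvReduce.induct with
  | case1 t h => rw [pvReduce, dif_pos h]; exact fun x hx => hx
  | case2 t h ih =>
    intro x hx
    rw [pvReduce, dif_neg h] at hx
    have := ih x hx
    rcases List.mem_append.1 this with h' | h'
    · exact PySem.List.mem_of_mem_slice _ _ _ h'
    · exact PySem.List.mem_of_mem_slice _ _ _ h'

-- the loop exits only when no adjacent open-close pair remains
theorem pvReduce_no_pair (t : List Char) : ¬ ['(', ')'] <:+: pvReduce t := by
  induction t using pvReduce.induct with
  | case1 t h =>
    rw [pvReduce, dif_pos h]
    exact (PySem.Chars.find_eq_neg_one_iff t ['(', ')']).1 h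
  | case2 t h ih => rw [pvReduce, dif_neg h]; exact ih

-- a bracket-only string with no adjacent open-close pair is closers then openers
theorem pvNormal_form : ∀ t : List Char, (∀ x ∈ t, x = '(' ∨ x = ')') →
    ¬ ['(', ')'] <:+: t → ∃ a b, t = List.replicate a ')' ++ List.replicate b '(' := by
  intro t
  induction t with
  | nil => exact fun _ _ => ⟨0, 0, rfl⟩
  | cons c t ih =>
    intro hb hnp
    have hbt : ∀ x ∈ t, x = '(' ∨ x = ')' := fun x hx => hb x (List.mem_cons_of_mem c hx)
    have hnpt : ¬ ['(', ')'] <:+: t := by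
      intro ⟨s₁, s₂, hs⟩
      exact hnp ⟨c :: s₁, s₂, by simp [← hs]⟩
    obtain ⟨a, b, hab⟩ := ih hbt hnpt
    rcases hb c (List.mem_cons_self) with hc | hc
    · subst hc
      rcases a with _ | a'
      · exact ⟨0, b + 1, by simp [hab, List.replicate_succ]⟩
      · exfalso
        apply hnp
        refine ⟨[], (List.replicate a' ')' ++ List.replicate b '('), ?_⟩
        simp [hab, List.replicate_succ]
    · subst hc
      exact ⟨a + 1, b, by simp [hab, List.replicate_succ]⟩

-- A's fold over the normal form
theorem pvFold_rep_close (a : Nat) : ∀ k : Int,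
    (List.replicate a ')').foldl pvAStep (0, k) = (0, k + a) := by
  induction a with
  | zero => intro k; simp
  | succ n ih =>
    intro k
    rw [List.replicate_succ, List.foldl_cons]
    have : pvAStep (0, k) ')' = (0, k + 1) := by simp [pvAStep]
    rw [this, ih (k + 1)]
    congr 1
    push_cast
    ring

theorem pvFold_rep_open (b : Nat) : ∀ p : Int × Int,
    (List.replicate b '(').foldl pvAStep p = (p.1 + b, p.2) := by
  induction b with
  | zero => intro p; simp
  | succ n ih =>
    intro p
    rw [List.replicate_succ, List.foldl_cons]
    have : pvAStep p '(' = (p.1 + 1, p.2) := by simp [pvAStep]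
    rw [this, ih]
    simp only
    congr 1
    push_cast
    ring

-- ===== VERDICT (by name: the statement is the Claim_ definition above) =====
theorem balance_brackets_spec : Claim_equal_balance_brackets := by
  intro s _
  unfold Spec_balance_brackets balance_brackets balance_brackets_alt
  simp only
  set t := pvReduce (s.toList.filter (fun ch => ch == '(' || ch == ')')) with hT
  have hbr : ∀ x ∈ t, x = '(' ∨ x = ')' := by
    intro x hx
    have := pvReduce_subset _ x hx
    have := List.of_mem_filter this
    simpa [decide_eq_true_eq] using this
  obtain ⟨a, b, hab⟩ := pvNormal_form t hbr (pvReduce_no_pair _)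
  have hfold : s.toList.foldl pvAStep (0, 0) = ((b : Int), (a : Int)) := by
    rw [← pvFold_filter, ← pvReduce_fold _ _ (by norm_num), ← hT, hab,
      List.foldl_append, pvFold_rep_close, pvFold_rep_open]
    simp
  have hca : PySem.Chars.count t [')'] = a := by
    rw [pvCount_singleton, hab]
    simp [List.count_replicate]
  have hcb : PySem.Chars.count t ['('] = b := by
    rw [pvCount_singleton, hab]
    simp [List.count_replicate]
  rw [hfold, hca, hcb]
  simp
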